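-- pv_equiv track=rewrite | github.com/ozzy2438/amazon_sales_scrape | show_top_products.py | extract_asin
-- ===== SOURCE A (Python) =====
-- def extract_asin(product_id):
--     # ASIN genellikle URL içindeki /dp/ kısmından sonra gelir
--     if not product_id:
--         return "Unknown"
--
--     parts = product_id.split('/')
--     for i, part in enumerate(parts):
--         if part == 'dp' and i+1 < len(parts):
--             return parts[i+1]
--
--     return "Unknown"
-- ===== SOURCE B (Python) =====
-- def extract_asin(product_id):
--     # Substring search for '/dp/' in '/'+url instead of splitting into segments.
--     if not product_id:
--         return "Unknown"
--     s = '/' + product_id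
--     i = s.find('/dp/')
--     if i == -1:
--         return "Unknown"
--     rest = s[i + 4:]
--     j = rest.find('/')
--     if j == -1:
--         return rest
--     return rest[:j]
-- ===== Notes on version B (the rewrite author's own statement) =====
-- stated objective: idiomatic
-- what changed: Replaces A's split('/')-into-segments plus indexed scan loop by a single substring search: find '/dp/' in '/'+url and slice out the text up to the next '/'.
import Mathlib
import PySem

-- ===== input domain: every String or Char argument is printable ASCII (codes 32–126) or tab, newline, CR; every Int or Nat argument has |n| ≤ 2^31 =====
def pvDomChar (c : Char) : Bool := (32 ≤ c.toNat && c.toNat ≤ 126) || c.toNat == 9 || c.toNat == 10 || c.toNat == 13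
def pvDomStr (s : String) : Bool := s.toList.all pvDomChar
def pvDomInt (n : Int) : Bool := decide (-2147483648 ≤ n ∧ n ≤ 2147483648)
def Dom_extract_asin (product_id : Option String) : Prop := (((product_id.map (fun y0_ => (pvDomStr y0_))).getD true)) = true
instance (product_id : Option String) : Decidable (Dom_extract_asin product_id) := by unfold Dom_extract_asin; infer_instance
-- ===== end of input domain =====

-- B replaces A's split('/')-and-scan loop by a single substring search for '/dp/' in '/'+url (idiomatic; same cost).


-- ===== PORT A =====
-- A's loop 'for i, part in enumerate(parts): if part == "dp" and i+1 < len(parts): return parts[i+1]'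
-- as structural recursion over the parts list (the index i is only used to test for / fetch the successor part).
def extractLoopA : List (List Char) → String
  | [] => "Unknown"
  | p :: rest =>
    if p = ['d', 'p'] ∧ rest ≠ [] then String.ofList (rest.headD [])
    else extractLoopA rest

def extract_asin (product_id : Option String) : String :=
  match product_id with
  | none => "Unknown"                                   -- 'if not product_id'
  | some s =>
    if s = "" then "Unknown"                            -- 'if not product_id' (empty string)
    else extractLoopA (PySem.Chars.splitOn s.toList ['/'])   -- parts = product_id.split('/')

-- ===== PORT B =====
def extract_asin_alt (product_id : Option String) : String :=
  match product_id with
  | none => "Unknown"                                   -- 'if not product_id'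
  | some s =>
    if s = "" then "Unknown"
    else
      let t : List Char := '/' :: s.toList              -- s = '/' + product_id
      let i : Int := PySem.Chars.find t ['/', 'd', 'p', '/']   -- i = s.find('/dp/')
      if i = -1 then "Unknown"
      else
        let rest : List Char := PySem.List.slice t (some (i + 4)) none   -- rest = s[i+4:]
        let j : Int := PySem.Chars.find rest ['/']      -- j = rest.find('/')
        if j = -1 then String.ofList rest
        else String.ofList (PySem.List.slice rest none (some j))         -- rest[:j]

-- ===== PRECONDITION & SPEC =====
def Spec_extract_asin (product_id : Option String) (out : String) : Prop := out = extract_asin_alt product_id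
instance (product_id : Option String) (out : String) : Decidable (Spec_extract_asin product_id out) := by unfold Spec_extract_asin; infer_instance

-- ===== CLAIM (what is proved, stated in full; the proofs are below) =====
def Claim_equal_extract_asin : Prop := ∀ (product_id : Option String), Dom_extract_asin product_id → Spec_extract_asin product_id (extract_asin product_id)

-- ===== LEMMAS AND PROOFS =====

-- clean structural model of split('/')
def pySplitSlash : List Char → List (List Char)
  | [] => [[]]
  | c :: rest => if c = '/' then [] :: pySplitSlash rest else (pySplitSlash rest).modifyHead (c :: ·)

theorem pySplitSlash_ne_nil : ∀ (l : List Char), pySplitSlash l ≠ [] := by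
  intro l
  induction l with
  | nil => simp [pySplitSlash]
  | cons c rest ih =>
    simp only [pySplitSlash]
    split_ifs
    · simp
    · cases h : pySplitSlash rest with
      | nil => exact absurd h ih
      | cons p ps => simp

theorem go_slash : ∀ (fuel : Nat) (l cur : List Char) (acc : List (List Char)), l.length ≤ fuel →
    PySem.Chars.splitOn.go ['/'] fuel l cur acc
      = acc.reverse ++ (pySplitSlash l).modifyHead (cur.reverse ++ ·) := by
  intro fuel
  induction fuel with
  | zero =>
    intro l cur acc h
    have hl : l = [] := by cases l <;> simp_all
    subst hl
    rw [PySem.Chars.splitOn.go]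
    simp [pySplitSlash]
  | succ n ih =>
    intro l cur acc h
    cases l with
    | nil =>
      rw [PySem.Chars.splitOn.go]
      · simp [pySplitSlash]
      · omega
    | cons c rest =>
      rw [PySem.Chars.splitOn.go]
      simp only [List.isPrefixOf]
      by_cases hc : c = '/'
      · subst hc
        simp only [beq_self_eq_true, Bool.true_and, if_true]
        have hdrop : List.drop ['/'].length ('/' :: rest) = rest := rfl
        rw [hdrop, ih rest [] (cur.reverse :: acc) (by simpa using Nat.le_of_succ_le_succ h)]
        cases hps : pySplitSlash rest with
        | nil => exact absurd hps (pySplitSlash_ne_nil rest)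
        | cons p ps =>
          simp [pySplitSlash, hps]
      · have hb : (('/' : Char) == c) = false := by
          rw [beq_eq_false_iff_ne]; exact fun hq => hc hq.symm
        simp only [hb, Bool.false_and]
        rw [ih rest (c :: cur) acc (by simpa using Nat.le_of_succ_le_succ h)]
        cases hps : pySplitSlash rest with
        | nil => exact absurd hps (pySplitSlash_ne_nil rest)
        | cons p ps =>
          simp [pySplitSlash, hc, hps]

theorem splitOn_slash (cs : List Char) : PySem.Chars.splitOn cs ['/'] = pySplitSlash cs := by
  unfold PySem.Chars.splitOn
  rw [go_slash (cs.length + 1) cs [] [] (by omega)]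
  cases h : pySplitSlash cs with
  | nil => exact absurd h (pySplitSlash_ne_nil cs)
  | cons p ps => simp

theorem pySplitSlash_no_slash : ∀ (cs : List Char), '/' ∉ cs → pySplitSlash cs = [cs] := by
  intro cs h
  induction cs with
  | nil => rfl
  | cons c rest ih =>
    have hc : c ≠ '/' := fun hc => h (by simp [hc])
    have := ih (fun hm => h (by simp [hm]))
    simp [pySplitSlash, hc, this]

theorem pySplitSlash_append : ∀ (pre rest : List Char), '/' ∉ pre →
    pySplitSlash (pre ++ '/' :: rest) = pre :: pySplitSlash rest := by
  intro pre rest h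
  induction pre with
  | nil => simp [pySplitSlash]
  | cons c p ih =>
    have hc : c ≠ '/' := fun hc => h (by simp [hc])
    have := ih (fun hm => h (by simp [hm]))
    simp [pySplitSlash, hc, this]

theorem pySplitSlash_headD : ∀ (l : List Char),
    (pySplitSlash l).headD [] = l.takeWhile (fun c => c != '/') := by
  intro l
  induction l with
  | nil => rfl
  | cons c rest ih =>
    by_cases hc : c = '/'
    · subst hc; simp [pySplitSlash, List.takeWhile]
    · cases hps : pySplitSlash rest with
      | nil => exact absurd hps (pySplitSlash_ne_nil rest)
      | cons p ps =>
        rw [hps] at ih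
        simp only [List.headD] at ih
        have hcc : (c != '/') = true := by simp [hc]
        simp [pySplitSlash, hc, hps, List.takeWhile, ih, hcc]

-- every char of a prefix occurring at offset j is a char of the big list
theorem prefix_drop_getElem {l s : List Char} {j k : Nat}
    (h : l <+: s.drop j) (hk : k < l.length) : s[j + k]? = l[k]? := by
  obtain ⟨t, ht⟩ := h
  rw [← List.getElem?_drop, ← ht, List.getElem?_append_left hk]

theorem prefix_drop_infix {l s : List Char} {j : Nat} (h : l <+: s.drop j) : l <:+: s :=
  h.isInfix.trans (s.drop_suffix j).isInfix

theorem find_neg_one_of {s pat : List Char} (h : ∀ j : Nat, ¬ pat <+: s.drop j) :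
    PySem.Chars.find s pat = -1 := by
  rw [PySem.Chars.find_eq_neg_one_iff]
  intro hinf
  obtain ⟨j, hj⟩ := (PySem.Chars.exists_prefix_drop_iff_isIn pat s).mpr
    ((PySem.Chars.isIn_iff_infix pat s).mpr hinf)
  exact h j hj

theorem find_eq_of {s pat : List Char} {k : Nat}
    (h1 : pat <+: s.drop k) (h2 : ∀ i < k, ¬ pat <+: s.drop i) :
    PySem.Chars.find s pat = (k : Int) := by
  have hne : PySem.Chars.find s pat ≠ -1 := by
    intro h
    exact ((PySem.Chars.find_eq_neg_one_iff s pat).mp h) (prefix_drop_infix h1)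
  have h0 : 0 ≤ PySem.Chars.find s pat := by
    have := PySem.Chars.neg_one_le_find s pat
    omega
  obtain ⟨hp, hmin⟩ := PySem.Chars.find_spec h0
  rcases lt_trichotomy (PySem.Chars.find s pat).toNat k with hlt | heq | hgt
  · exact absurd hp (h2 _ hlt)
  · omega
  · exact absurd h1 (hmin k hgt)

-- 'take until the first slash' via find is takeWhile
theorem find_slash_take (l : List Char) :
    (if PySem.Chars.find l ['/'] = -1 then l else l.take (PySem.Chars.find l ['/']).toNat)
      = l.takeWhile (fun c => c != '/') := by
  cases hd : l.dropWhile (fun c => c != '/') with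
  | nil =>
    have hl : l.takeWhile (fun c => c != '/') = l := by
      conv_rhs => rw [← List.takeWhile_append_dropWhile (p := fun c => c != '/') (l := l)]
      simp [hd]
    have hnot : '/' ∉ l := by
      intro hm
      rw [← hl] at hm
      have := List.mem_takeWhile_imp hm
      simp at this
    rw [find_neg_one_of (fun j hj => ?_), if_pos rfl, hl]
    have : l[j + 0]? = some '/' := by rw [prefix_drop_getElem hj (by simp)]; rfl
    exact hnot (List.mem_of_getElem? this)
  | cons c rest =>
    have hc : c = '/' := by
      have := List.head_dropWhile_not (fun c => c != '/') (l := l) (by simp [hd])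
      simp [hd] at this
      exact this
    subst hc
    set pre := l.takeWhile (fun c => c != '/') with hpre
    have hl : l = pre ++ '/' :: rest := by
      conv_lhs => rw [← List.takeWhile_append_dropWhile (p := fun c => c != '/') (l := l)]
      rw [hd]
    have hnop : '/' ∉ pre := by
      intro hm
      have := List.mem_takeWhile_imp hm
      simp at this
    have hfind : PySem.Chars.find l ['/'] = (pre.length : Int) := by
      apply find_eq_of
      · rw [hl, List.drop_left]
        exact ⟨rest, rfl⟩
      · intro i hi hp
        have : l[i + 0]? = some '/' := by rw [prefix_drop_getElem hp (by simp)]; rfl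
        rw [hl, List.getElem?_append_left (by omega)] at this
        exact hnop (List.mem_of_getElem? (by simpa using this))
    rw [hfind]
    rw [if_neg (by omega)]
    simp only [Int.toNat_natCast]
    rw [hl, List.take_left]

-- B's core computation on the '/'-prefixed character list (proof-side name for B's inlined lets)
def bcore (t : List Char) : String :=
  let i : Int := PySem.Chars.find t ['/', 'd', 'p', '/']
  if i = -1 then "Unknown"
  else
    let rest : List Char := PySem.List.slice t (some (i + 4)) none
    let j : Int := PySem.Chars.find rest ['/']
    if j = -1 then String.ofList rest
    else String.ofList (PySem.List.slice rest none (some j))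

theorem drop_shift (pre rest : List Char) (j : Nat) (hj : pre.length + 1 ≤ j) :
    List.drop j ('/' :: (pre ++ '/' :: rest)) = List.drop (j - (pre.length + 1)) ('/' :: rest) := by
  have hsplit : ('/' :: (pre ++ '/' :: rest)) = ('/' :: pre) ++ ('/' :: rest) := by simp
  rw [hsplit, List.drop_append, List.drop_eq_nil_of_le (by simp; omega)]
  simp

theorem prefix_zero_dp {pre rest : List Char} (hnop : '/' ∉ pre)
    (hj : ['/', 'd', 'p', '/'] <+: ('/' :: (pre ++ '/' :: rest))) : pre = ['d', 'p'] := by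
  obtain ⟨t, ht⟩ := hj
  simp only [List.cons_append, List.nil_append] at ht
  have heq : pre ++ '/' :: rest = 'd' :: 'p' :: '/' :: t := by
    injection ht with _ h2
    exact h2.symm
  cases pre with
  | nil => simp at heq
  | cons a q =>
    cases q with
    | nil => simp at heq
    | cons b q2 =>
      cases q2 with
      | nil =>
        simp only [List.cons_append, List.nil_append, List.cons.injEq] at heq
        simp [heq.1, heq.2.1]
      | cons c2 q3 =>
        simp only [List.cons_append, List.cons.injEq] at heq
        exact absurd (by simp [heq.2.2.1] : '/' ∈ a :: b :: c2 :: q3) hnop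

theorem no_early {pre rest : List Char} (hnop : '/' ∉ pre) (hdp : pre ≠ ['d', 'p']) {j : Nat}
    (hj : ['/', 'd', 'p', '/'] <+: List.drop j ('/' :: (pre ++ '/' :: rest))) :
    pre.length + 1 ≤ j := by
  by_contra hlt
  rw [Nat.not_le] at hlt
  rcases Nat.eq_zero_or_pos j with rfl | hpos
  · rw [List.drop_zero] at hj
    exact hdp (prefix_zero_dp hnop hj)
  · obtain ⟨j', rfl⟩ : ∃ j', j = j' + 1 := ⟨j - 1, by omega⟩
    have h0 : ('/' :: (pre ++ '/' :: rest))[j' + 1 + 0]? = some '/' := by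
      rw [prefix_drop_getElem hj (by norm_num)]; rfl
    have h1 : pre[j']? = some '/' := by
      have hleft : (pre ++ '/' :: rest)[j']? = pre[j']? := List.getElem?_append_left (by omega)
      simpa [hleft] using h0
    exact hnop (List.mem_of_getElem? h1)

theorem main_core : ∀ (n : Nat) (cs : List Char), cs.length ≤ n →
    extractLoopA (pySplitSlash cs) = bcore ('/' :: cs) := by
  intro n
  induction n with
  | zero =>
    intro cs h
    have : cs = [] := by cases cs <;> simp_all
    subst this
    decide
  | succ n ih =>
    intro cs h
    cases hd : cs.dropWhile (fun c => c != '/') with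
    | nil =>
      have hto : cs.takeWhile (fun c => c != '/') = cs := by
        conv_rhs => rw [← List.takeWhile_append_dropWhile (p := fun c => c != '/') (l := cs)]
        simp [hd]
      have hnot : '/' ∉ cs := by
        intro hm
        rw [← hto] at hm
        have := List.mem_takeWhile_imp hm
        simp at this
      have hfind : PySem.Chars.find ('/' :: cs) ['/', 'd', 'p', '/'] = -1 := by
        apply find_neg_one_of
        intro j hj
        have h3 : ('/' :: cs)[j + 3]? = some '/' := by
          rw [prefix_drop_getElem hj (by norm_num)]; rfl
        have : cs[j + 2]? = some '/' := by
          have : ('/' :: cs)[(j + 2) + 1]? = some '/' := by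
            have he : (j + 2) + 1 = j + 3 := by omega
            rw [he]; exact h3
          simpa using this
        exact hnot (List.mem_of_getElem? this)
      rw [pySplitSlash_no_slash cs hnot]
      simp [extractLoopA, bcore, hfind]
    | cons c rest =>
      have hc : c = '/' := by
        have := List.head_dropWhile_not (fun c => c != '/') (l := cs) (by simp [hd])
        simp [hd] at this
        exact this
      subst hc
      have hcs : cs = cs.takeWhile (fun c => c != '/') ++ '/' :: rest := by
        conv_lhs => rw [← List.takeWhile_append_dropWhile (p := fun c => c != '/') (l := cs)]
        rw [hd]
      set pre := cs.takeWhile (fun c => c != '/') with hpre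
      have hnop : '/' ∉ pre := by
        intro hm
        have := List.mem_takeWhile_imp hm
        simp at this
      have hlen : rest.length ≤ n := by
        have := congrArg List.length hcs
        simp at this
        omega
      rw [hcs, pySplitSlash_append pre rest hnop]
      by_cases hdp : pre = ['d', 'p']
      · rw [hdp]
        have hfind : PySem.Chars.find ('/' :: (['d', 'p'] ++ '/' :: rest)) ['/', 'd', 'p', '/']
            = ((0 : Nat) : Int) := by
          apply find_eq_of
          · rw [List.drop_zero]
            exact ⟨rest, rfl⟩
          · intro i hi
            exact absurd hi (Nat.not_lt_zero i)
        have hslice : PySem.List.slice ('/' :: (['d', 'p'] ++ '/' :: rest))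
            (some (((0 : Nat) : Int) + 4)) none = rest := by
          rw [PySem.List.slice_from _ (by norm_num)]
          norm_num
          rfl
        have hofl : (if PySem.Chars.find rest ['/'] = -1 then String.ofList rest
            else String.ofList (PySem.List.slice rest none (some (PySem.Chars.find rest ['/']))))
            = String.ofList (rest.takeWhile (fun c => c != '/')) := by
          rw [← find_slash_take rest]
          split_ifs with hjf
          · rfl
          · rw [PySem.List.slice_to _ (by have := PySem.Chars.neg_one_le_find rest ['/']; omega)]
        cases hps : pySplitSlash rest with
        | nil => exact absurd hps (pySplitSlash_ne_nil rest)
        | cons p ps =>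
          have hhead : p = rest.takeWhile (fun c => c != '/') := by
            have h2 := pySplitSlash_headD rest
            rw [hps] at h2
            simpa using h2
          simp only [bcore]
          rw [hfind, if_neg (by norm_num), hslice, hofl]
          simp [extractLoopA, hhead]
      · set f' := PySem.Chars.find ('/' :: rest) ['/', 'd', 'p', '/'] with hf'
        have hloop : extractLoopA (pre :: pySplitSlash rest) = extractLoopA (pySplitSlash rest) := by
          cases hps : pySplitSlash rest with
          | nil => exact absurd hps (pySplitSlash_ne_nil rest)
          | cons p ps => simp [extractLoopA, hdp]
        rw [hloop, ih rest hlen]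
        by_cases hf : f' = -1
        · have hbig : PySem.Chars.find ('/' :: (pre ++ '/' :: rest)) ['/', 'd', 'p', '/'] = -1 := by
            apply find_neg_one_of
            intro j hj
            have hge := no_early hnop hdp hj
            rw [drop_shift pre rest j hge] at hj
            exact (PySem.Chars.find_eq_neg_one_iff ('/' :: rest) ['/', 'd', 'p', '/']).mp
              (hf' ▸ hf) (prefix_drop_infix hj)
          simp only [bcore]
          rw [hbig, if_pos rfl, ← hf', if_pos hf]
        · have h0f : 0 ≤ f' := by
            have := PySem.Chars.neg_one_le_find ('/' :: rest) ['/', 'd', 'p', '/']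
            rw [← hf'] at this
            omega
          obtain ⟨hfp, hfmin⟩ := PySem.Chars.find_spec (hf' ▸ h0f :
            0 ≤ PySem.Chars.find ('/' :: rest) ['/', 'd', 'p', '/'])
          have hbig : PySem.Chars.find ('/' :: (pre ++ '/' :: rest)) ['/', 'd', 'p', '/']
              = ((pre.length + 1 + f'.toNat : Nat) : Int) := by
            apply find_eq_of
            · rw [drop_shift pre rest _ (by omega)]
              have he : pre.length + 1 + f'.toNat - (pre.length + 1) = f'.toNat := by omega
              rw [he]
              exact hf' ▸ hfp
            · intro i hi hj
              have hge := no_early hnop hdp hj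
              rw [drop_shift pre rest i hge] at hj
              exact (hf' ▸ hfmin) (i - (pre.length + 1)) (by omega) hj
          have hsliceL : PySem.List.slice ('/' :: rest) (some (f' + 4)) none
              = List.drop (f'.toNat + 4) ('/' :: rest) := by
            rw [PySem.List.slice_from _ (by omega)]
            congr 1
            omega
          have hsliceR : PySem.List.slice ('/' :: (pre ++ '/' :: rest))
              (some (((pre.length + 1 + f'.toNat : Nat) : Int) + 4)) none
              = List.drop (f'.toNat + 4) ('/' :: rest) := by
            rw [PySem.List.slice_from _ (by omega)]
            have he : (((pre.length + 1 + f'.toNat : Nat) : Int) + 4).toNat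
                = pre.length + 1 + f'.toNat + 4 := by omega
            rw [he, drop_shift pre rest _ (by omega)]
            congr 1
            omega
          simp only [bcore]
          rw [hbig, ← hf', if_neg hf,
            if_neg (show ¬(((pre.length + 1 + f'.toNat : Nat) : Int) = -1) by omega),
            hsliceL, hsliceR]

theorem alt_eq (s : String) (h : ¬ s = "") :
    extract_asin_alt (some s) = bcore ('/' :: s.toList) := by
  simp [extract_asin_alt, bcore, h]

-- ===== VERDICT (by name: the statement is the Claim_ definition above) =====
theorem extract_asin_spec : Claim_equal_extract_asin := by
  intro pid _
  unfold Spec_extract_asin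
  cases pid with
  | none => rfl
  | some s =>
    by_cases hs : s = ""
    · subst hs; rfl
    · rw [alt_eq s hs]
      simp only [extract_asin, if_neg hs]
      rw [splitOn_slash, main_core s.toList.length s.toList le_rfl]
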